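/- RE-INSTANTIATED by tools/port_start.py from Prog/Jsmn/StartStub.lean for THE FIXED IMAGES fixed/jsmn_{d,s}.bin (namespaces FStart / FRuns). Do not edit. -/
/-
  jsmn_d.bin / jsmn_s.bin: THE ENTRY STUB `_start_jsmn` (proofs/c6/start.S; 54 bytes at 100000H, the same in both binaries up to the displacement
  of the `call`), stepped by `v3_walk`, which makes the decode fact of every instruction by running the model's REAL decoder (X86/Derived/Prog/Decode.lean):
      mov rdi, [1FF000H] ; mov rsi, [1FF008H] ; mov rdx, [1FF010H] ; mov rcx, [1FF018H] ; call jsmn_main ;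
      mov [1FF020H], rax ; mov [3FFFF8H], rax ; hlt
    stub_head_D / stub_head_S   the four loads and the `call`: the view at jsmn_main's entry (`AtMain`: the four arguments, RSP = 7FFFF8H, the
                                return address 100025H stored there)
    stub_tail_D / stub_tail_S   after the return (100025H): the two stores of rax, up to the `hlt` at 100035H (NOT executed here: X86/Derived/Prog/Halt.lean)
  Form = Prog/Inflate/Inst4Stub.lean (`gz4_stub_reach`, `gz4_tail_reach`).
-/
import Prog.Jsmn.State
import Prog.Jsmn.Fixed.CodeFD
import Prog.Jsmn.Fixed.CodeFS

namespace X86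
namespace J6
namespace FStart
open X86.User (CodeAt RegsKept Span FlagsOK Layout toNat_add_ofNat toNat_ofNat_lt' add_ofNat_add)


set_option maxRecDepth 100000
set_option maxHeartbeats 4000000
set_option linter.unusedSimpArgs false
set_option linter.unusedVariables false

/-- Instruction fetch anywhere in the first 2 MB when 16 MB are mapped. -/
theorem stub_fetch {n : User.Layout} (hn4 : 0x800000 ≤ n.pages * 0x200000) :
    ∀ a : Word, 0x100000 ≤ a.toNat ∧ a.toNat + 15 ≤ 0x200000 → n.Has a 15 := fun a ha => by
  unfold User.Layout.Has User.Layout.lo User.Layout.hi; omega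

/-- The view at jsmn_main's entry `main`, against the view `v0` at the stub's entry: WHAT CHANGED. The stub loads rdi, rsi, rdx, rcx from the
parameter block and executes `call jsmn_main`: RSP goes from 800000H to 7FFFF8H, the return address 100025H is stored there. -/
structure AtMain (main : Word) (v0 : User.State) (a0 a1 a2 a3 : Word) (v : User.State) : Prop where
  rip : v.rip = main
  rsp : v.reg .rsp = 0x7ffff8
  rdi : v.reg .rdi = a0
  rsi : v.reg .rsi = a1
  rdx : v.reg .rdx = a2
  rcx : v.reg .rcx = a3
  mem : v.mem = v0.mem.writeLE 0x7ffff8 8 0x100025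

/-- The view at the stub's `hlt` (100035H), against the view `v` at jsmn_main's return point: registers unchanged, rax stored twice. -/
def AtHlt (v v' : User.State) : Prop :=
  v'.rip = 0x100035 ∧ (∀ r, v'.reg r = v.reg r) ∧
    v'.mem = (v.mem.writeLE 0x1ff020 8 (v.reg .rax).toNat).writeLE 0x3ffff8 8 (v.reg .rax).toNat

section
variable {n : User.Layout} (v0 : User.State) (a0 a1 a2 a3 : Word) (hn4 : 0x800000 ≤ n.pages * 0x200000)
  (hrsp : v0.reg .rsp = 0x800000)
  (h0 : UInt64.ofNat (v0.mem.readLE 0x1ff000 8) = a0) (h1 : UInt64.ofNat (v0.mem.readLE 0x1ff008 8) = a1)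
  (h2 : UInt64.ofNat (v0.mem.readLE 0x1ff010 8) = a2) (h3 : UInt64.ofNat (v0.mem.readLE 0x1ff018 8) = a3)
include hn4 hrsp h0 h1 h2 h3

/-- `_start_jsmn` of jsmn_d.bin: four loads, `call 10060a <jsmn_main>`, return address 100025H. -/
theorem stub_head_D (hcode : CodeAt v0.mem 0x100000 JsmnFDBytes.start_jsmn_bytes) (hrip : v0.rip = 0x100000) :
    Reach n v0 (AtMain 0x10060a v0 a0 a1 a2 a3) := by
  have hfetch := stub_fetch (n := n) hn4
  v3_walk hcode hfetch []
  exact Reach.done ⟨by simp, by simp, by simp, by simp, by simp, by simp, by simp⟩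

/-- `_start_jsmn` of jsmn_s.bin: four loads, `call 100721 <jsmn_main>`, return address 100025H. -/
theorem stub_head_S (hcode : CodeAt v0.mem 0x100000 JsmnFSBytes.start_jsmn_bytes) (hrip : v0.rip = 0x100000) :
    Reach n v0 (AtMain 0x100721 v0 a0 a1 a2 a3) := by
  have hfetch := stub_fetch (n := n) hn4
  v3_walk hcode hfetch []
  exact Reach.done ⟨by simp, by simp, by simp, by simp, by simp, by simp, by simp⟩

end

/-- jsmn_d.bin's stub after the return (100025H): `mov [1FF020H], rax ; mov [3FFFF8H], rax`, then the `hlt` at 100035H. -/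
theorem stub_tail_D {n : User.Layout} (v : User.State) (hn4 : 0x800000 ≤ n.pages * 0x200000)
    (hcode : CodeAt v.mem 0x100000 JsmnFDBytes.start_jsmn_bytes) (hrip : v.rip = 0x100025) : Reach n v (AtHlt v) := by
  have hfetch := stub_fetch (n := n) hn4
  v3_walk hcode hfetch [] until [0x100035]
  exact Reach.done ⟨by simp, fun r => by simp, by simp⟩

/-- jsmn_s.bin's stub after the return. -/
theorem stub_tail_S {n : User.Layout} (v : User.State) (hn4 : 0x800000 ≤ n.pages * 0x200000)
    (hcode : CodeAt v.mem 0x100000 JsmnFSBytes.start_jsmn_bytes) (hrip : v.rip = 0x100025) : Reach n v (AtHlt v) := by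
  have hfetch := stub_fetch (n := n) hn4
  v3_walk hcode hfetch [] until [0x100035]
  exact Reach.done ⟨by simp, fun r => by simp, by simp⟩

end FStart
end J6
end X86
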